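-- pv_equiv track=rewrite | github.com/tomysshadow/WBH-DBH-Extractor | MTV Music Generator 3 Extract.py | synchsafe
-- ===== SOURCE A (Python) =====
-- def synchsafe(in2):
--         out = 127
--         mask = 127
--         while mask ^ 2147483647:
--                 out = in2 & ~mask
--                 out <<= 1
--                 out |= in2 & mask
--                 mask = ((mask + 1) << 8) - 1
--                 in2 = out
--         return out
-- ===== SOURCE B (Python) =====
-- def synchsafe(in2):
--         # closed form: spread bits 0-6, 7-13, 14-20 into 7-bit synchsafe groups;
--         # all bits from 21 up (including the sign) are carried by the final term.
--         return ((in2 & 0x7F)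
--                 | ((in2 & 0x3F80) << 1)
--                 | ((in2 & 0x1FC000) << 2)
--                 | ((in2 & ~0x1FFFFF) << 3))
-- ===== Notes on version B (the rewrite author's own statement) =====
-- stated objective: simpler
-- what changed: Replaced the three-iteration mask-growing while loop with a single branch-free closed-form expression that masks and shifts the three 7-bit groups and the unbounded high part into place.
import Mathlib
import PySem

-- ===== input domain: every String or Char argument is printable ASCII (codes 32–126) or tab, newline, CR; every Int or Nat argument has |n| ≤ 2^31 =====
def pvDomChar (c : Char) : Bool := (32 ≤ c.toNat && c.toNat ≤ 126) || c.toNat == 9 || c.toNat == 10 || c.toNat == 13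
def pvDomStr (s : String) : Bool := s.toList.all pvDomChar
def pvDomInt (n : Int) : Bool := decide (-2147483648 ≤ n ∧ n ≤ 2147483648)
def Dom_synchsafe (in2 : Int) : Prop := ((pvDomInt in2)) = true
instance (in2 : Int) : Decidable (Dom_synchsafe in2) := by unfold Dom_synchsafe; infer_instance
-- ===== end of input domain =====

-- B replaces A's three-iteration mask-growing loop with one closed-form mask-and-shift expression (objective: simpler).


-- ===== PORT A =====
-- A's while loop runs exactly 3 times (mask: 127 -> 32767 -> 8388607 -> 2147483647);
-- the Nat fuel argument (4) only makes that fixed iteration count structural.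
def synchsafeLoop : Nat → Int → Int → Int → Int
  | 0, _, out, _ => out
  | fuel + 1, in2, out, mask =>
      if PySem.Int.bxor mask 2147483647 ≠ 0 then
        let out1 := PySem.Int.band in2 (Int.not mask)
        let out2 := out1 <<< (1 : Nat)
        let out3 := PySem.Int.bor out2 (PySem.Int.band in2 mask)
        synchsafeLoop fuel out3 out3 (((mask + 1) <<< (8 : Nat)) - 1)
      else out

def synchsafe (in2 : Int) : Int := synchsafeLoop 4 in2 127 127

-- ===== PORT B =====
def synchsafe_alt (in2 : Int) : Int :=
  PySem.Int.bor
    (PySem.Int.bor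
      (PySem.Int.bor
        (PySem.Int.band in2 0x7F)
        ((PySem.Int.band in2 0x3F80) <<< (1 : Nat)))
      ((PySem.Int.band in2 0x1FC000) <<< (2 : Nat)))
    ((PySem.Int.band in2 (Int.not 0x1FFFFF)) <<< (3 : Nat))

-- ===== PRECONDITION & SPEC =====
def Spec_synchsafe (in2 : Int) (out : Int) : Prop := out = synchsafe_alt in2
instance (in2 : Int) (out : Int) : Decidable (Spec_synchsafe in2 out) := by unfold Spec_synchsafe; infer_instance

-- ===== CLAIM (what is proved, stated in full; the proofs are below) =====
def Claim_equal_synchsafe : Prop := ∀ (in2 : Int), Dom_synchsafe in2 → Spec_synchsafe in2 (synchsafe in2)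

-- ===== LEMMAS AND PROOFS =====
theorem nat_and_shift (n x k : ℕ) : n &&& (x <<< k) = ((n >>> k) &&& x) <<< k := by
  apply Nat.eq_of_testBit_eq
  intro i
  simp [Nat.testBit_and, Nat.testBit_shiftLeft, Nat.testBit_shiftRight]
  by_cases h : k ≤ i
  · simp [h, Nat.add_sub_cancel' h]
  · simp [h]

theorem nat_and_run (n k d : ℕ) : n &&& ((2 ^ d - 1) <<< k) = (n / 2 ^ k % 2 ^ d) * 2 ^ k := by
  rw [nat_and_shift, Nat.and_two_pow_sub_one_eq_mod, Nat.shiftLeft_eq, Nat.shiftRight_eq_div_pow]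

theorem nat_run_eq (k d : ℕ) : 2 ^ (k + d) - 2 ^ k = (2 ^ d - 1) <<< k := by
  rw [Nat.shiftLeft_eq, Nat.sub_mul, one_mul, pow_add, Nat.mul_comm (2^k)]

theorem nat_mod_split (n k d : ℕ) : n % 2 ^ (k + d) = n % 2 ^ k + 2 ^ k * (n / 2 ^ k % 2 ^ d) := by
  rw [pow_add, Nat.mod_mul]

theorem int_band_run (a : ℤ) (k d : ℕ) :
    PySem.Int.band a ((2:ℤ) ^ (k + d) - 2 ^ k) = a % 2 ^ (k + d) - a % 2 ^ k := by
  have hlen : (2:ℕ) ^ k ≤ 2 ^ (k + d) := Nat.pow_le_pow_right (by norm_num) (by omega)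
  have hcast : (((2 ^ (k + d) - 2 ^ k : ℕ)) : ℤ) = (2:ℤ) ^ (k + d) - 2 ^ k := by
    push_cast [hlen]; ring
  rw [← hcast]
  cases a with
  | ofNat n =>
      rw [show ((Int.ofNat n) = ((n:ℕ) : ℤ)) from rfl, PySem.Int.band_natCast]
      rw [nat_run_eq, nat_and_run]
      have hm : ∀ (j : ℕ), (n:ℤ) % (2:ℤ)^j = ((n % 2^j : ℕ) : ℤ) := by
        intro j; norm_cast
      rw [hm, hm]
      rw [nat_mod_split n k d]
      push_cast
      ring
  | negSucc m =>
      have hA : ¬ (0 ≤ Int.negSucc m) := by simp [Int.negSucc_eq]; omega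
      have hB : (0:ℤ) ≤ ((2 ^ (k + d) - 2 ^ k : ℕ) : ℤ) := by positivity
      have hPpos : (0:ℤ) < 2 ^ (k + d) := by positivity
      have hQpos : (0:ℤ) < 2 ^ k := by positivity
      have hm1 : (-Int.negSucc m - 1) = (m:ℤ) := by simp [Int.negSucc_eq]
      simp only [PySem.Int.band, if_pos hB, if_neg hA, hm1, Int.toNat_natCast]
      rw [Nat.and_comm, nat_run_eq, nat_and_run, ← nat_run_eq]
      rw [Int.negSucc_emod _ hPpos, Int.negSucc_emod _ hQpos]
      have hmc : ∀ (j : ℕ), (m:ℤ) % (2:ℤ)^j = ((m % 2^j : ℕ) : ℤ) := by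
        intro j; norm_cast
      rw [hmc, hmc]
      have hX : m / 2 ^ k % 2 ^ d * 2 ^ k ≤ 2 ^ (k + d) - 2 ^ k := by
        have : m / 2 ^ k % 2 ^ d ≤ 2 ^ d - 1 := by
          have := Nat.mod_lt (m / 2 ^ k) (y := 2 ^ d) (by positivity); omega
        calc m / 2 ^ k % 2 ^ d * 2 ^ k ≤ (2 ^ d - 1) * 2 ^ k := by
              exact Nat.mul_le_mul_right _ this
          _ = 2 ^ (k + d) - 2 ^ k := by rw [Nat.sub_mul, one_mul, ← pow_add, Nat.add_comm d k]
      rw [nat_mod_split m k d]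
      push_cast [hX, hlen]
      ring

theorem int_not_eq (a : ℤ) : Int.not a = -a - 1 := by
  cases a with
  | ofNat n => simp [Int.not, Int.negSucc_eq]; ring
  | negSucc n => simp [Int.not, Int.negSucc_eq]

theorem nat_or_ones_core (m k : ℕ) : m ||| (2 ^ k - 1) = ((m >>> k) <<< k) ||| (2 ^ k - 1) := by
  apply Nat.eq_of_testBit_eq
  intro i
  simp [Nat.testBit_or, Nat.testBit_shiftLeft, Nat.testBit_shiftRight, Nat.testBit_two_pow_sub_one]
  by_cases h : k ≤ i
  · simp [h, Nat.add_sub_cancel' h, show ¬ i < k by omega]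
  · simp [h, show i < k by omega]

theorem nat_or_ones (m k : ℕ) : m ||| (2 ^ k - 1) = 2 ^ k * (m / 2 ^ k) + (2 ^ k - 1) := by
  rw [nat_or_ones_core, Nat.shiftLeft_eq, Nat.shiftRight_eq_div_pow, Nat.mul_comm]
  rw [← Nat.two_pow_add_eq_or_of_lt (Nat.sub_lt (by positivity) Nat.one_pos)]

theorem int_band_not (a : ℤ) (k : ℕ) :
    PySem.Int.band a (Int.not ((2:ℤ) ^ k - 1)) = a - a % 2 ^ k := by
  have hQpos : (0:ℤ) < 2 ^ k := by positivity
  have hnot : Int.not ((2:ℤ) ^ k - 1) = -(2 ^ k) := by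
    rw [int_not_eq]; ring
  rw [hnot]
  have hBneg : ¬ (0:ℤ) ≤ -(2 ^ k) := by omega
  have hbn : (-(-((2:ℤ) ^ k)) - 1).toNat = 2 ^ k - 1 := by
    have : (-(-((2:ℤ) ^ k)) - 1) = ((2 ^ k - 1 : ℕ) : ℤ) := by
      push_cast [Nat.one_le_two_pow]; ring
    rw [this, Int.toNat_natCast]
  cases a with
  | ofNat n =>
      have hA : (0:ℤ) ≤ Int.ofNat n := by exact Int.ofNat_nonneg n
      simp only [PySem.Int.band, if_pos hA, if_neg hBneg, hbn]
      have htn : (Int.ofNat n).toNat = n := rfl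
      rw [htn, Nat.and_two_pow_sub_one_eq_mod]
      have hmc : (Int.ofNat n) % (2:ℤ)^k = ((n % 2^k : ℕ) : ℤ) := by
        rw [show (Int.ofNat n) = ((n:ℕ):ℤ) from rfl]; norm_cast
      rw [hmc]
      push_cast [Nat.mod_le]
      rfl
  | negSucc m =>
      have hA : ¬ (0 ≤ Int.negSucc m) := by simp [Int.negSucc_eq]; omega
      have hm1 : (-Int.negSucc m - 1).toNat = m := by
        simp [Int.negSucc_eq]
      simp only [PySem.Int.band, if_neg hA, if_neg hBneg, hm1, hbn]
      rw [nat_or_ones, Int.negSucc_emod _ hQpos]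
      have hmc : (m:ℤ) % (2:ℤ)^k = ((m % 2^k : ℕ) : ℤ) := by norm_cast
      rw [hmc]
      have h2 := Nat.div_add_mod m (2 ^ k)
      have h3 := Nat.mod_le m (2 ^ k)
      rw [show 2 ^ k * (m / 2 ^ k) + (2 ^ k - 1) = (m - m % 2 ^ k) + (2 ^ k - 1) from by omega]
      push_cast [h3, Nat.one_le_two_pow, Int.negSucc_eq]
      ring

theorem int_bor_disj (a b : ℤ) (j : ℕ) (h1 : a % 2 ^ j = 0) (h2 : 0 ≤ b) (h3 : b < 2 ^ j) :
    PySem.Int.bor a b = a + b := by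
  have hQpos : (0:ℤ) < 2 ^ j := by positivity
  obtain ⟨b', rfl⟩ : ∃ b' : ℕ, b = (b' : ℤ) := ⟨b.toNat, (Int.toNat_of_nonneg h2).symm⟩
  have hb'lt : b' < 2 ^ j := by exact_mod_cast h3
  have hB : (0:ℤ) ≤ (b' : ℤ) := Int.ofNat_nonneg b'
  cases a with
  | ofNat n =>
      have hA : (0:ℤ) ≤ Int.ofNat n := Int.ofNat_nonneg n
      simp only [PySem.Int.bor, if_pos hA, if_pos hB]
      have hn : n % 2 ^ j = 0 := by
        have : (Int.ofNat n) % (2:ℤ)^j = ((n % 2^j : ℕ) : ℤ) := by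
          rw [show (Int.ofNat n) = ((n:ℕ):ℤ) from rfl]; norm_cast
        rw [this] at h1; exact_mod_cast h1
      have hsplit : n = 2 ^ j * (n / 2 ^ j) := by
        conv_lhs => rw [← Nat.div_add_mod n (2 ^ j)]
        rw [hn, Nat.add_zero]
      have := Nat.two_pow_add_eq_or_of_lt hb'lt (n / 2 ^ j)
      have htn : (Int.ofNat n).toNat = n := rfl
      have htb : ((b':ℤ)).toNat = b' := Int.toNat_natCast b'
      rw [htn, htb]
      rw [show n ||| b' = (2 ^ j * (n / 2 ^ j)) ||| b' from by rw [← hsplit]]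
      rw [← this, ← hsplit]
      push_cast
      rfl
  | negSucc m =>
      have hA : ¬ (0 ≤ Int.negSucc m) := by simp [Int.negSucc_eq]; omega
      have hm1 : (-Int.negSucc m - 1).toNat = m := by simp [Int.negSucc_eq]
      simp only [PySem.Int.bor, if_neg hA, if_pos hB, hm1]
      have hmmod : m % 2 ^ j = 2 ^ j - 1 := by
        rw [Int.negSucc_emod _ hQpos] at h1
        have hmc : (m:ℤ) % (2:ℤ)^j = ((m % 2^j : ℕ) : ℤ) := by norm_cast
        rw [hmc] at h1
        have hc2 : ((2:ℤ))^j = ((2^j : ℕ) : ℤ) := by push_cast; ring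
        rw [hc2] at h1
        have := Nat.mod_lt m (y := 2^j) (by positivity)
        omega
      have habs : m &&& b' = b' := by
        have e1 : m &&& b' = m &&& ((2 ^ j - 1) &&& b') := by
          rw [Nat.and_comm (2 ^ j - 1) b', Nat.and_two_pow_sub_one_of_lt_two_pow hb'lt]
        rw [e1, ← Nat.and_assoc, Nat.and_two_pow_sub_one_eq_mod, hmmod,
            Nat.and_comm (2 ^ j - 1) b', Nat.and_two_pow_sub_one_of_lt_two_pow hb'lt]
      have htb : ((b':ℤ)).toNat = b' := Int.toNat_natCast b'
      rw [htb, habs]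
      have hble : b' ≤ m := by
        have := Nat.mod_le m (2 ^ j); omega
      push_cast [Int.negSucc_eq, hble]
      ring

theorem loop_step (f : ℕ) (i o mask : ℤ) (h : PySem.Int.bxor mask 2147483647 ≠ 0) :
    synchsafeLoop (f + 1) i o mask =
      synchsafeLoop f
        (PySem.Int.bor ((PySem.Int.band i (Int.not mask)) <<< (1 : ℕ)) (PySem.Int.band i mask))
        (PySem.Int.bor ((PySem.Int.band i (Int.not mask)) <<< (1 : ℕ)) (PySem.Int.band i mask))
        (((mask + 1) <<< (8 : ℕ)) - 1) := by
  simp only [synchsafeLoop, if_pos h]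

theorem loop_done (f : ℕ) (i o : ℤ) : synchsafeLoop (f + 1) i o 2147483647 = o := by
  simp only [synchsafeLoop]
  rw [if_neg (by decide)]

theorem band_low (x : ℤ) (k : ℕ) : PySem.Int.band x ((2:ℤ) ^ k - 1) = x % 2 ^ k := by
  have h := int_band_run x 0 k
  simpa [Int.emod_one] using h

theorem step_val (x : ℤ) (k : ℕ) :
    PySem.Int.bor ((PySem.Int.band x (Int.not ((2:ℤ) ^ k - 1))) <<< (1 : ℕ))
      (PySem.Int.band x ((2:ℤ) ^ k - 1)) = 2 * (x - x % 2 ^ k) + x % 2 ^ k := by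
  have hQpos : (0:ℤ) < 2 ^ k := by positivity
  rw [int_band_not, band_low, Int.shiftLeft_eq]
  rw [int_bor_disj _ _ (k + 1) ?h1 ?h2 ?h3]
  · ring
  case h1 =>
    have hdm := Int.ediv_add_emod x (2 ^ k)
    have : (x - x % 2 ^ k) * 2 ^ 1 = 2 ^ (k + 1) * (x / 2 ^ k) := by
      linear_combination (-2:ℤ) * hdm
    rw [this, Int.mul_emod_right]
  case h2 => exact Int.emod_nonneg x (by positivity)
  case h3 =>
    have h := Int.emod_lt_of_pos x hQpos
    have : (2:ℤ) ^ k < 2 ^ (k + 1) := by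
      rw [pow_succ]; nlinarith
    omega

theorem main_eq (a : ℤ) : synchsafe a = synchsafe_alt a := by
  -- A side: three loop iterations then exit
  have hA : synchsafe a = synchsafeLoop 3 (2 * (a - a % 128) + a % 128)
      (2 * (a - a % 128) + a % 128) 32767 := by
    rw [show synchsafe a = synchsafeLoop 4 a 127 127 from rfl]
    rw [show (127:ℤ) = 2 ^ 7 - 1 from by norm_num] 
    rw [loop_step _ _ _ _ (by decide), step_val]
    norm_num
    rw [show ((128:ℤ) <<< (8:ℕ) - 1) = 32767 from by decide]
  have hA2 : ∀ x : ℤ, synchsafeLoop 3 x x 32767 =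
      synchsafeLoop 2 (2 * (x - x % 32768) + x % 32768) (2 * (x - x % 32768) + x % 32768) 8388607 := by
    intro x
    rw [show (32767:ℤ) = 2 ^ 15 - 1 from by norm_num]
    rw [loop_step _ _ _ _ (by decide), step_val]
    norm_num
    rw [show ((32768:ℤ) <<< (8:ℕ) - 1) = 8388607 from by decide]
  have hA3 : ∀ x : ℤ, synchsafeLoop 2 x x 8388607 =
      2 * (x - x % 8388608) + x % 8388608 := by
    intro x
    rw [show (8388607:ℤ) = 2 ^ 23 - 1 from by norm_num]
    rw [loop_step _ _ _ _ (by decide), step_val]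
    norm_num
    rw [show ((8388608:ℤ) <<< (8:ℕ) - 1) = 2147483647 from by decide]
    rw [loop_done 0]
  rw [hA, hA2, hA3]
  -- B side
  have hB : synchsafe_alt a =
      ((a % 16384 - a % 128) * 2 + a % 128) + (a % 2097152 - a % 16384) * 4
        + (a - a % 2097152) * 8 := by
    unfold synchsafe_alt
    rw [show (127:ℤ) = 2 ^ 7 - 1 from by norm_num, band_low]
    rw [show (16256:ℤ) = 2 ^ (7 + 7) - 2 ^ 7 from by norm_num, int_band_run]
    rw [show (2080768:ℤ) = 2 ^ (14 + 7) - 2 ^ 14 from by norm_num, int_band_run]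
    rw [show (2097151:ℤ) = 2 ^ 21 - 1 from by norm_num, int_band_not]
    rw [Int.shiftLeft_eq, Int.shiftLeft_eq, Int.shiftLeft_eq]
    norm_num
    rw [PySem.Int.bor_comm (a % 128)]
    rw [int_bor_disj ((a % 16384 - a % 128) * 2) (a % 128) 8 (by omega) (by omega) (by omega)]
    rw [PySem.Int.bor_comm ((a % 16384 - a % 128) * 2 + a % 128)]
    rw [int_bor_disj ((a % 2097152 - a % 16384) * 4) ((a % 16384 - a % 128) * 2 + a % 128) 16
      (by omega) (by omega) (by omega)]
    rw [PySem.Int.bor_comm ((a % 2097152 - a % 16384) * 4 + ((a % 16384 - a % 128) * 2 + a % 128))]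
    rw [int_bor_disj ((a - a % 2097152) * 8)
      ((a % 2097152 - a % 16384) * 4 + ((a % 16384 - a % 128) * 2 + a % 128)) 24
      (by omega) (by omega) (by omega)]
    ring
  rw [hB]
  omega

-- ===== VERDICT (by name: the statement is the Claim_ definition above) =====
theorem synchsafe_spec : Claim_equal_synchsafe := by
  intro in2 _
  unfold Spec_synchsafe
  exact main_eq in2
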